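-- pv_equiv track=rewrite | github.com/gabrielemongirdaite/advent_of_code_2020 | day23_part1.py | destination
-- ===== SOURCE A (Python) =====
-- def destination(current, lst, to_be_deleted):
--     copy_lst = lst.copy()
--     for i in to_be_deleted:
--         try:
--             copy_lst.remove(i)
--         except:
--             pass
--     if current - 1 < min(copy_lst):
--         dest = max(copy_lst)
--     else:
--         if current - 1 in copy_lst:
--             dest = current - 1
--         else:
--             current = current - 1
--             dest = destination(current, copy_lst, to_be_deleted)
--     return dest
-- ===== SOURCE B (Python) =====
-- def destination(current, lst, to_be_deleted):
--     copy_lst = lst.copy()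
--     for i in to_be_deleted:
--         try:
--             copy_lst.remove(i)
--         except ValueError:
--             pass
--     candidates = [c for c in copy_lst if c <= current - 1]
--     return max(candidates) if candidates else max(copy_lst)
-- ===== Notes on version B (the rewrite author's own statement) =====
-- stated objective: simpler
-- what changed: Replaces A's unbounded recursion that decrements current and re-runs the whole removal pass at every level with a single filter of the remaining cups by c <= current-1 followed by one max (falling back to max of all remaining cups when the filter is empty).
-- outside the precondition, e.g. on destination(10, [5, 5, 3], [5]): A returns 3, B returns 5
import Mathlib
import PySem

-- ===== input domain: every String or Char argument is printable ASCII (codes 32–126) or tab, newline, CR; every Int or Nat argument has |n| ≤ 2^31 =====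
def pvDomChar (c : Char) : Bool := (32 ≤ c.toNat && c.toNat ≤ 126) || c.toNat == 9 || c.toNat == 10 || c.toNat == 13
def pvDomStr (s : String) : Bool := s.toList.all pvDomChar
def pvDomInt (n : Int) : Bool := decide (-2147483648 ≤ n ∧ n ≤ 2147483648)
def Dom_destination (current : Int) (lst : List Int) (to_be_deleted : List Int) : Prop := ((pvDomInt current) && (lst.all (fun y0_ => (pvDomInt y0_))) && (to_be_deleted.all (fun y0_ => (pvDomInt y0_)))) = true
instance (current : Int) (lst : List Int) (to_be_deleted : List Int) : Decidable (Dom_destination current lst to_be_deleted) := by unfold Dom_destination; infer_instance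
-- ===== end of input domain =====

-- B replaces A's recursion (decrement current, re-run the removal pass, recurse) by one
-- filter of the remaining cups by `c ≤ current - 1` and a single max; objective: simpler.

-- ===== PORT A =====
-- the removal loop shared verbatim by both Pythons: for i in to_be_deleted: try: copy.remove(i) except: pass
def pyRemovePass (lst : List Int) (to_be_deleted : List Int) : List Int :=
  to_be_deleted.foldl (fun acc i => (PySem.List.remove? acc i).getD acc) lst

-- A's recursive body; the Nat fuel is only a totality guard (inside Pre_ it never runs out,
-- see destGo_eq below); fuel 0 / empty copy (where Python raises ValueError) return junk 0.
def destGo : Nat → Int → List Int → List Int → Int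
  | 0, _, _, _ => 0
  | fuel + 1, current, lst, to_be_deleted =>
    let copy := pyRemovePass lst to_be_deleted
    match PySem.List.min? copy (fun x => x) with
    | none => 0  -- Python: min([]) raises ValueError; excluded by Pre_
    | some mn =>
      if current - 1 < mn then (PySem.List.max? copy (fun x => x)).getD 0
      else if (current - 1) ∈ copy then current - 1
      else destGo fuel (current - 1) copy to_be_deleted

def destination (current : Int) (lst : List Int) (to_be_deleted : List Int) : Int :=
  destGo ((current - ((PySem.List.min? (pyRemovePass lst to_be_deleted) (fun x => x)).getD current)).toNat + 1)
    current lst to_be_deleted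

-- ===== PORT B =====
def destination_alt (current : Int) (lst : List Int) (to_be_deleted : List Int) : Int :=
  let copy := pyRemovePass lst to_be_deleted
  let candidates := copy.filter (fun c => decide (c ≤ current - 1))
  if candidates ≠ [] then (PySem.List.max? candidates (fun x => x)).getD 0
  else (PySem.List.max? copy (fun x => x)).getD 0  -- max([]) raises in Python; excluded by Pre_

-- ===== PRECONDITION & SPEC =====
-- Pre_ excludes (a) inputs whose cups are all deleted, where A (and B) raise ValueError on
-- min/max of an empty list, and (b) the defensible duplicate corner where some to_be_deleted
-- value occurs MORE often in lst than in to_be_deleted: how many duplicate occurrences survive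
-- is accidental there (A's recursion re-runs the removal pass at every level, removing ever
-- more occurrences), and B's single removal pass keeps them.
def Pre_destination (current : Int) (lst : List Int) (to_be_deleted : List Int) : Prop :=
  (∃ v ∈ lst, v ∉ to_be_deleted) ∧ (∀ v ∈ to_be_deleted, lst.count v ≤ to_be_deleted.count v)
instance (current : Int) (lst : List Int) (to_be_deleted : List Int) : Decidable (Pre_destination current lst to_be_deleted) := by unfold Pre_destination; infer_instance

def pvWitness_destination : Int × List Int × List Int := (10, [3, 4, 6], [4])

def Spec_destination (current : Int) (lst : List Int) (to_be_deleted : List Int) (out : Int) : Prop := out = destination_alt current lst to_be_deleted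
instance (current : Int) (lst : List Int) (to_be_deleted : List Int) (out : Int) : Decidable (Spec_destination current lst to_be_deleted out) := by unfold Spec_destination; infer_instance

-- ===== CLAIM (what is proved, stated in full; the proofs are below) =====
def Claim_equal_destination : Prop := ∀ (current : Int) (lst : List Int) (to_be_deleted : List Int), Dom_destination current lst to_be_deleted → Pre_destination current lst to_be_deleted → Spec_destination current lst to_be_deleted (destination current lst to_be_deleted)

-- ===== LEMMAS AND PROOFS =====

-- one removal pass removes, for each value v, min(count lst v, count tbd v) occurrences of v
theorem count_pyRemovePass (to_be_deleted : List Int) :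
    ∀ (lst : List Int) (v : Int),
      (pyRemovePass lst to_be_deleted).count v = lst.count v - to_be_deleted.count v := by
  induction to_be_deleted with
  | nil => intro lst v; simp [pyRemovePass]
  | cons i rest ih =>
    intro lst v
    have hstep : pyRemovePass lst (i :: rest)
        = pyRemovePass ((PySem.List.remove? lst i).getD lst) rest := by
      simp [pyRemovePass]
    rw [hstep, ih]
    by_cases hm : i ∈ lst
    · rw [PySem.List.remove?_eq_some_erase lst i hm]
      simp only [Option.getD_some]
      by_cases hv : v = i
      · subst hv
        rw [List.count_erase_self]
        rw [List.count_cons_self]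
        omega
      · rw [List.count_erase_of_ne hv]
        rw [List.count_cons, if_neg (by simpa using Ne.symm hv), Nat.add_zero]
    · rw [(PySem.List.remove?_eq_none_iff lst i).mpr hm]
      simp only [Option.getD_none]
      by_cases hv : v = i
      · subst hv
        have h0 : lst.count v = 0 := List.count_eq_zero.mpr hm
        rw [List.count_cons_self, h0]
        omega
      · rw [List.count_cons, if_neg (by simpa using Ne.symm hv), Nat.add_zero]

-- if no to_be_deleted value is left in C, a further removal pass leaves C unchanged
theorem pyRemovePass_fixed (to_be_deleted : List Int) :
    ∀ (C : List Int), (∀ i ∈ to_be_deleted, i ∉ C) → pyRemovePass C to_be_deleted = C := by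
  induction to_be_deleted with
  | nil => intro C _; simp [pyRemovePass]
  | cons i rest ih =>
    intro C h
    have hni : i ∉ C := h i (by simp)
    have hstep : pyRemovePass C (i :: rest)
        = pyRemovePass ((PySem.List.remove? C i).getD C) rest := by simp [pyRemovePass]
    rw [hstep, (PySem.List.remove?_eq_none_iff C i).mpr hni]
    simp only [Option.getD_none]
    exact ih C (fun j hj => h j (by simp [hj]))

-- the value A's recursion computes: largest remaining cup ≤ current-1, else the overall max
theorem destGo_eq (to_be_deleted : List Int) :
    ∀ (fuel : Nat) (current : Int) (lst : List Int) (mn : Int),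
      pyRemovePass (pyRemovePass lst to_be_deleted) to_be_deleted = pyRemovePass lst to_be_deleted →
      PySem.List.min? (pyRemovePass lst to_be_deleted) (fun x => x) = some mn →
      (current - 1 - mn).toNat < fuel →
      destGo fuel current lst to_be_deleted =
        (if (pyRemovePass lst to_be_deleted).filter (fun c => decide (c ≤ current - 1)) ≠ [] then
          (PySem.List.max? ((pyRemovePass lst to_be_deleted).filter (fun c => decide (c ≤ current - 1))) (fun x => x)).getD 0
         else (PySem.List.max? (pyRemovePass lst to_be_deleted) (fun x => x)).getD 0) := by
  intro fuel
  induction fuel with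
  | zero => intro current lst mn _ _ hf; omega
  | succ f ih =>
    intro current lst mn hidem hmin hf
    set C := pyRemovePass lst to_be_deleted with hC
    have hfix : pyRemovePass C to_be_deleted = C := by rw [hC]; exact hidem
    have hmn_min : ∀ y ∈ C, mn ≤ y := fun y hy => PySem.List.min?_isMin hmin y hy
    have hstep : destGo (f + 1) current lst to_be_deleted
        = (if current - 1 < mn then (PySem.List.max? C (fun x => x)).getD 0
           else if (current - 1) ∈ C then current - 1
           else destGo f (current - 1) C to_be_deleted) := by
      simp only [destGo, ← hC, hmin]
    rw [hstep]
    by_cases hlt : current - 1 < mn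
    · -- every remaining cup exceeds current-1: the filter is empty, both sides take max C
      have hfilt : C.filter (fun c => decide (c ≤ current - 1)) = [] := by
        rw [List.filter_eq_nil_iff]
        intro x hx
        have := hmn_min x hx
        simp only [decide_eq_true_eq]
        omega
      rw [if_pos hlt, hfilt, if_neg (by simp)]
    · rw [if_neg hlt]
      by_cases hmem : (current - 1) ∈ C
      · -- current-1 remains: it is the largest element of the filter
        have hcand : (current - 1) ∈ C.filter (fun c => decide (c ≤ current - 1)) := by
          simp [List.mem_filter, hmem]
        have hne : C.filter (fun c => decide (c ≤ current - 1)) ≠ [] := by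
          intro h; rw [h] at hcand; exact absurd hcand (List.not_mem_nil)
        obtain ⟨m, hm⟩ := Option.ne_none_iff_exists'.mp
          (fun h => hne ((PySem.List.max?_eq_none_iff _ (fun x : Int => x)).mp h))
        have hm_mem := PySem.List.max?_mem hm
        have hm_le : m ≤ current - 1 := by
          have := (List.mem_filter.mp hm_mem).2
          simpa using this
        have hle_m : current - 1 ≤ m := PySem.List.max?_isMax hm _ hcand
        rw [if_pos hmem, if_pos hne, hm]
        simp [le_antisymm hm_le hle_m]
      · rw [if_neg hmem]
        have hmn_mem : mn ∈ C := PySem.List.min?_mem hmin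
        have hne_mn : current - 1 ≠ mn := fun h => hmem (h ▸ hmn_mem)
        have hf' : (current - 1 - 1 - mn).toNat < f := by omega
        have hrec := ih (current - 1) C mn (by rw [hfix]; exact hfix)
          (by rw [hfix]; exact hmin) hf'
        rw [hrec]
        simp only [hfix]
        have hfeq : C.filter (fun c => decide (c ≤ current - 1 - 1))
            = C.filter (fun c => decide (c ≤ current - 1)) := by
          apply List.filter_congr
          intro x hx
          have hxne : x ≠ current - 1 := fun h => hmem (h ▸ hx)
          simp only [decide_eq_decide]
          omega
        rw [hfeq]

-- ===== VERDICT (by name: the statement is the Claim_ definition above) =====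
theorem destination_spec : Claim_equal_destination := by
  intro current lst to_be_deleted _ hpre
  obtain ⟨⟨v, hvl, hvt⟩, hcnt⟩ := hpre
  set C := pyRemovePass lst to_be_deleted with hC
  -- every to_be_deleted value is fully removed from C
  have hgone : ∀ i ∈ to_be_deleted, i ∉ C := by
    intro i hi
    have h0 : C.count i = 0 := by
      rw [hC, count_pyRemovePass]
      have := hcnt i hi
      omega
    exact List.count_eq_zero.mp h0
  -- the witness value survives, so C is nonempty
  have hvC : v ∈ C := by
    have hcv : C.count v = lst.count v := by
      rw [hC, count_pyRemovePass]
      have h0 : to_be_deleted.count v = 0 := List.count_eq_zero.mpr hvt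
      omega
    have hpos : 0 < lst.count v := List.count_pos_iff.mpr hvl
    exact List.count_pos_iff.mp (by omega)
  have hCne : C ≠ [] := fun h => by rw [h] at hvC; exact absurd hvC (List.not_mem_nil)
  obtain ⟨mn, hmin⟩ := Option.ne_none_iff_exists'.mp
    (fun h => hCne ((PySem.List.min?_eq_none_iff _ (fun x : Int => x)).mp h))
  have hfix : pyRemovePass C to_be_deleted = C :=
    pyRemovePass_fixed to_be_deleted C hgone
  have hmain := destGo_eq to_be_deleted ((current - mn).toNat + 1) current lst mn
    (by rw [← hC]; exact hfix) (by rw [← hC]; exact hmin) (by omega)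
  unfold Spec_destination destination destination_alt
  rw [← hC, hmin]
  simp only [Option.getD_some]
  exact hmain
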